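-- pv_equiv track=rewrite | github.com/loadfix/Django | companies/scripts/csv2post.py | getDirectorSexFromName
-- ===== SOURCE A (Python) =====
-- mens_names = [
--     "James", "Michael", "Peter", "Silvio", "David",  "Robert", "Grant", "John", "Geoffrey", "Ross", "Paul", "Wayne",
--     "Keith", "Christopher", "Andrew", "Adam", "Matt", "Brett", "Stuart", "Anthony", "Craig", "Frank", "Vincent",
--     "Marcus", "Hamish", "Stephen", "Philip", "Bryce", "Ivan", "Alvin", "Alan", "Simon", "Geoff", "Neil", "Nathan",
--     "Jeremy", "Charles", "Gregory", "Alasdair", "Ben", "Jeremy", "Peter", "Brian", "Brad", "Graeme", "Colin", "Harald",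
--     "Daniel", "Leonard", "Jonathan", "Barry", "Scott", "Dennis", "Rodney", "Thomas", "Darren", "Nicholas", "Raymond",
--     "Malcolm", "Gavin",
--
-- ]
--
-- womens_names = [
--     "Natalya", "Rosemary", "Rebekah", "Elizabeth", "Jacqueline", "Belinda", "Diane", "Heather", "Linda", "Anna", "Liza",
--     "Karen", "Nancy", "Phillipa", "Rebecca",
-- ]
--
-- def getDirectorSexFromName(name):
--
--     for male_name in mens_names:
--         if name.startswith(male_name + " "):
--             return "M"
--
--     for female_name in womens_names:
--         if name.startswith(female_name + " "):
--             return "F"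
--
--     return "U"
-- ===== SOURCE B (Python) =====
-- # Single pass over the characters: collect the first token until the first space,
-- # then classify it by padded-substring membership in two space-delimited name strings.
--
-- MEN = " James Michael Peter Silvio David Robert Grant John Geoffrey Ross Paul Wayne Keith Christopher Andrew Adam Matt Brett Stuart Anthony Craig Frank Vincent Marcus Hamish Stephen Philip Bryce Ivan Alvin Alan Simon Geoff Neil Nathan Jeremy Charles Gregory Alasdair Ben Jeremy Peter Brian Brad Graeme Colin Harald Daniel Leonard Jonathan Barry Scott Dennis Rodney Thomas Darren Nicholas Raymond Malcolm Gavin "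
--
-- WOMEN = " Natalya Rosemary Rebekah Elizabeth Jacqueline Belinda Diane Heather Linda Anna Liza Karen Nancy Phillipa Rebecca "
--
-- def getDirectorSexFromName(name):
--     head = []
--     for ch in name:
--         if ch == ' ':
--             probe = " " + "".join(head) + " "
--             if probe in MEN:
--                 return "M"
--             if probe in WOMEN:
--                 return "F"
--             return "U"
--         head.append(ch)
--     return "U"
-- ===== Notes on version B (the rewrite author's own statement) =====
-- stated objective: alternative
-- what changed: Replaces the two startswith-scanning loops over name lists with a single character-level pass that extracts the first space-delimited token and classifies it by padded-substring membership in two space-joined name strings.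
import Mathlib
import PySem

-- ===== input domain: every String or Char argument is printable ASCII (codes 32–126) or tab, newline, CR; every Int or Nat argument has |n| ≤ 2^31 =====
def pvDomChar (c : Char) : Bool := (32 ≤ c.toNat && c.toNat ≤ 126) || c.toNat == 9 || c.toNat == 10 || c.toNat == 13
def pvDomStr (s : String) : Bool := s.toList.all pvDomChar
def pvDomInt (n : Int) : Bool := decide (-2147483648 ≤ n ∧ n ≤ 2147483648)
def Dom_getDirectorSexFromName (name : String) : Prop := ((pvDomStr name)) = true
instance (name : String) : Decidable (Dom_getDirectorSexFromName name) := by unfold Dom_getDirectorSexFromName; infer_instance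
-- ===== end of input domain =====

-- B replaces A's two startswith-scanning loops by a single character pass that collects
-- the first space-delimited token and classifies it by padded-substring membership in two
-- space-joined name strings (objective: alternative algorithm).

-- ===== PORT A =====
def mensNames : List String := [
    "James", "Michael", "Peter", "Silvio", "David", "Robert", "Grant", "John", "Geoffrey", "Ross", "Paul", "Wayne",
    "Keith", "Christopher", "Andrew", "Adam", "Matt", "Brett", "Stuart", "Anthony", "Craig", "Frank", "Vincent",
    "Marcus", "Hamish", "Stephen", "Philip", "Bryce", "Ivan", "Alvin", "Alan", "Simon", "Geoff", "Neil", "Nathan",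
    "Jeremy", "Charles", "Gregory", "Alasdair", "Ben", "Jeremy", "Peter", "Brian", "Brad", "Graeme", "Colin", "Harald",
    "Daniel", "Leonard", "Jonathan", "Barry", "Scott", "Dennis", "Rodney", "Thomas", "Darren", "Nicholas", "Raymond",
    "Malcolm", "Gavin"]

def womensNames : List String := [
    "Natalya", "Rosemary", "Rebekah", "Elizabeth", "Jacqueline", "Belinda", "Diane", "Heather", "Linda", "Anna", "Liza",
    "Karen", "Nancy", "Phillipa", "Rebecca"]

-- A's two for-loops with early return, as List.any over the same lists, same order
def getDirectorSexFromName (name : String) : String :=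
  if mensNames.any (fun maleName => PySem.Str.startswith name (maleName ++ " ")) then "M"
  else if womensNames.any (fun femaleName => PySem.Str.startswith name (femaleName ++ " ")) then "F"
  else "U"

-- ===== PORT B =====
def pvMenStr : String := " James Michael Peter Silvio David Robert Grant John Geoffrey Ross Paul Wayne Keith Christopher Andrew Adam Matt Brett Stuart Anthony Craig Frank Vincent Marcus Hamish Stephen Philip Bryce Ivan Alvin Alan Simon Geoff Neil Nathan Jeremy Charles Gregory Alasdair Ben Jeremy Peter Brian Brad Graeme Colin Harald Daniel Leonard Jonathan Barry Scott Dennis Rodney Thomas Darren Nicholas Raymond Malcolm Gavin "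

def pvWomenStr : String := " Natalya Rosemary Rebekah Elizabeth Jacqueline Belinda Diane Heather Linda Anna Liza Karen Nancy Phillipa Rebecca "

-- Source B's for-loop over the characters, head the accumulated first-token characters
def pvFirstScan (cs : List Char) (head : List Char) : String :=
  match cs with
  | [] => "U"
  | c :: rest =>
    if c = ' ' then
      let probe := " " ++ String.ofList head ++ " "
      if PySem.Str.isIn probe pvMenStr then "M"
      else if PySem.Str.isIn probe pvWomenStr then "F"
      else "U"
    else pvFirstScan rest (head ++ [c])

def getDirectorSexFromName_alt (name : String) : String := pvFirstScan name.toList []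

-- ===== PRECONDITION & SPEC =====
def Spec_getDirectorSexFromName (name : String) (out : String) : Prop := out = getDirectorSexFromName_alt name
instance (name : String) (out : String) : Decidable (Spec_getDirectorSexFromName name out) := by unfold Spec_getDirectorSexFromName; infer_instance

-- ===== CLAIM (what is proved, stated in full; the proofs are below) =====
def Claim_equal_getDirectorSexFromName : Prop := ∀ (name : String), Dom_getDirectorSexFromName name → Spec_getDirectorSexFromName name (getDirectorSexFromName name)

-- ===== LEMMAS AND PROOFS =====

-- the space-wrapped concatenation " w1 w2 … wn " as a char list
def pvCat (ws : List String) : List Char := ' ' :: ws.flatMap (fun w => w.toList ++ [' '])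

theorem pvCat_cons (w : String) (ws : List String) :
    pvCat (w :: ws) = ' ' :: (w.toList ++ pvCat ws) := by
  simp [pvCat]

set_option maxRecDepth 8192 in
theorem menStr_eq : pvMenStr.toList = pvCat mensNames := by decide

set_option maxRecDepth 8192 in
theorem womenStr_eq : pvWomenStr.toList = pvCat womensNames := by decide

theorem mens_no_space : ∀ m ∈ mensNames, ' ' ∉ m.toList := by decide

theorem womens_no_space : ∀ m ∈ womensNames, ' ' ∉ m.toList := by decide

theorem split_at_space (cs : List Char) (h : ' ' ∈ cs) :
    ∃ t, cs = cs.takeWhile (fun c => c != ' ') ++ ' ' :: t := by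
  have hd : cs.dropWhile (fun c => c != ' ') ≠ [] := by
    simp only [ne_eq, List.dropWhile_eq_nil_iff, not_forall]
    exact ⟨' ', h, by simp⟩
  refine ⟨(cs.dropWhile (fun c => c != ' ')).tail, ?_⟩
  have hh := List.head_dropWhile_not (p := fun c => c != ' ') (l := cs) hd
  simp only [bne_eq_false_iff_eq] at hh
  have hsplit := List.cons_head_tail hd
  rw [hh] at hsplit
  have heq : cs = cs.takeWhile (fun c => c != ' ') ++ cs.dropWhile (fun c => c != ' ') :=
    (List.takeWhile_append_dropWhile ..).symm
  conv_lhs => rw [heq]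
  congr 1
  exact hsplit.symm

theorem no_space_takeWhile (m : List Char) (hm : ' ' ∉ m) (t : List Char) :
    (m ++ ' ' :: t).takeWhile (fun c => c != ' ') = m := by
  induction m with
  | nil => simp
  | cons x xs ih =>
    simp only [List.cons_append, List.takeWhile_cons]
    have hx : x ≠ ' ' := fun hxe => hm (hxe ▸ List.mem_cons_self ..)
    simp [hx, ih (fun hmem => hm (List.mem_cons_of_mem _ hmem))]

-- an occurrence of a pattern starting with ' ' inside m ++ s with spaceless m lies in s
theorem infix_strip (m : List Char) (hm : ' ' ∉ m) (l s : List Char)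
    (h : (' ' :: l) <:+: (m ++ s)) : (' ' :: l) <:+: s := by
  induction m with
  | nil => simpa using h
  | cons c m' ih =>
    rw [List.cons_append, List.infix_cons_iff] at h
    rcases h with hpre | hinf
    · obtain ⟨r, hr⟩ := hpre
      have hc : c = ' ' := by
        have := congrArg (fun xs => xs.head?) hr
        simpa using this.symm
      exact absurd (hc ▸ List.mem_cons_self ..) hm
    · exact ih (fun hmem => hm (List.mem_cons_of_mem _ hmem)) hinf

-- " t " occurs in " w1 … wn " (spaceless words, spaceless t) iff t is one of the words
theorem token_infix (ws : List String) (hw : ∀ w ∈ ws, ' ' ∉ w.toList)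
    (t : List Char) (ht : ' ' ∉ t) :
    ((' ' :: (t ++ [' '])) <:+: pvCat ws) ↔ ∃ w ∈ ws, w.toList = t := by
  induction ws with
  | nil =>
    simp only [List.not_mem_nil, false_and, exists_false, iff_false]
    intro hinf
    have := hinf.length_le
    simp [pvCat] at this
  | cons w ws ih =>
    rw [pvCat_cons]
    constructor
    · intro h
      rw [List.infix_cons_iff] at h
      rcases h with hpre | hinf
      · obtain ⟨r, hr⟩ := hpre
        have h2 : t ++ ' ' :: r = w.toList ++ pvCat ws := by
          have h' : ' ' :: (t ++ ' ' :: r) = ' ' :: (w.toList ++ pvCat ws) := by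
            simpa [List.append_assoc] using hr
          exact List.cons_injective h'
        have h3 : pvCat ws = ' ' :: ws.flatMap (fun w => w.toList ++ [' ']) := rfl
        rw [h3] at h2
        have h4 := congrArg (fun xs => xs.takeWhile (fun c => c != ' ')) h2
        simp only at h4
        rw [no_space_takeWhile t ht, no_space_takeWhile w.toList (hw w (List.mem_cons_self ..))] at h4
        exact ⟨w, List.mem_cons_self .., h4.symm⟩
      · have h5 := infix_strip w.toList (hw w (List.mem_cons_self ..)) (t ++ [' ']) (pvCat ws) hinf
        obtain ⟨w', hmem, heq⟩ := (ih (fun x hx => hw x (List.mem_cons_of_mem _ hx))).mp h5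
        exact ⟨w', List.mem_cons_of_mem _ hmem, heq⟩
    · rintro ⟨w', hmem, rfl⟩
      rcases List.mem_cons.mp hmem with rfl | hmem'
      · refine List.IsPrefix.isInfix ⟨ws.flatMap (fun w => w.toList ++ [' ']), ?_⟩
        simp [pvCat]
      · have h6 := (ih (fun x hx => hw x (List.mem_cons_of_mem _ hx))).mpr ⟨w', hmem', rfl⟩
        exact h6.trans (List.IsSuffix.isInfix ⟨' ' :: w.toList, by simp⟩)

-- the classification B applies to a completed first token
def pvClassify (t : List Char) : String :=
  if PySem.Str.isIn (" " ++ String.ofList t ++ " ") pvMenStr then "M"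
  else if PySem.Str.isIn (" " ++ String.ofList t ++ " ") pvWomenStr then "F"
  else "U"

theorem scan_eq (cs : List Char) (acc : List Char) :
    pvFirstScan cs acc =
      if ' ' ∈ cs then pvClassify (acc ++ cs.takeWhile (fun c => c != ' ')) else "U" := by
  induction cs generalizing acc with
  | nil => simp [pvFirstScan]
  | cons c rest ih =>
    by_cases hc : c = ' '
    · subst hc
      simp [pvFirstScan, pvClassify]
    · have hne : (c != ' ') = true := by simpa using hc
      simp only [pvFirstScan, if_neg hc, ih (acc ++ [c]), List.takeWhile_cons, hne, if_pos,
        List.mem_cons, List.append_assoc, List.singleton_append]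
      simp [Ne.symm hc]

theorem classify_eq (t : List Char) (ht : ' ' ∉ t) :
    pvClassify t =
      if ∃ w ∈ mensNames, w.toList = t then "M"
      else if ∃ w ∈ womensNames, w.toList = t then "F"
      else "U" := by
  have hprobe : (" " ++ String.ofList t ++ " ").toList = ' ' :: (t ++ [' ']) := by
    simp
  have hm : PySem.Str.isIn (" " ++ String.ofList t ++ " ") pvMenStr = true ↔ ∃ w ∈ mensNames, w.toList = t := by
    rw [PySem.Str.isIn_eq, hprobe, menStr_eq, PySem.Chars.isIn_iff_infix]
    exact token_infix mensNames mens_no_space t ht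
  have hf : PySem.Str.isIn (" " ++ String.ofList t ++ " ") pvWomenStr = true ↔ ∃ w ∈ womensNames, w.toList = t := by
    rw [PySem.Str.isIn_eq, hprobe, womenStr_eq, PySem.Chars.isIn_iff_infix]
    exact token_infix womensNames womens_no_space t ht
  unfold pvClassify
  by_cases h1 : ∃ w ∈ mensNames, w.toList = t
  · simp only [hm.mpr h1]
    simp [h1]
  · have hm' : PySem.Str.isIn (" " ++ String.ofList t ++ " ") pvMenStr = false := by
      rw [Bool.eq_false_iff, ne_eq, hm]; exact h1
    by_cases h2 : ∃ w ∈ womensNames, w.toList = t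
    · simp only [hm', hf.mpr h2]
      simp [h1, h2]
    · have hf' : PySem.Str.isIn (" " ++ String.ofList t ++ " ") pvWomenStr = false := by
        rw [Bool.eq_false_iff, ne_eq, hf]; exact h2
      simp only [hm', hf']
      simp [h1, h2]

-- with a space in name, "name startswith (m + ' ')" is exactly "first token = m"
theorem startswith_iff_token (name : String) (m : String) (hm : ' ' ∉ m.toList)
    (t : List Char) (ht : name.toList = name.toList.takeWhile (fun c => c != ' ') ++ ' ' :: t) :
    (PySem.Str.startswith name (m ++ " ") = true ↔
      m.toList = name.toList.takeWhile (fun c => c != ' ')) := by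
  have htok : ' ' ∉ name.toList.takeWhile (fun c => c != ' ') := by
    intro hmem
    have := List.mem_takeWhile_imp hmem
    simp at this
  rw [show PySem.Str.startswith name (m ++ " ") = PySem.Chars.startswith name.toList (m ++ " ").toList by simp,
      PySem.Chars.startswith_iff, String.toList_append]
  have hsp : " ".toList = [' '] := rfl
  rw [hsp]
  constructor
  · rintro ⟨r, hr⟩
    conv_rhs at hr => rw [ht]
    have h2 : (m.toList ++ ' ' :: r) = name.toList.takeWhile (fun c => c != ' ') ++ ' ' :: t := by
      simpa using hr
    have h3 := congrArg (fun xs => xs.takeWhile (fun c => c != ' ')) h2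
    simp only at h3
    rwa [no_space_takeWhile m.toList hm, no_space_takeWhile _ htok] at h3
  · intro he
    rw [ht, ← he]
    exact ⟨t, by simp⟩

-- without a space, "name startswith (m + ' ')" is false
theorem startswith_false_of_no_space (name : String) (m : String) (hsp : ' ' ∉ name.toList) :
    PySem.Chars.startswith name.toList (m.toList ++ [' ']) = false := by
  rw [Bool.eq_false_iff]
  intro htrue
  rw [PySem.Chars.startswith_iff] at htrue
  obtain ⟨r, hr⟩ := htrue
  apply hsp
  rw [← hr]
  simp

-- ===== VERDICT (by name: the statement is the Claim_ definition above) =====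
theorem getDirectorSexFromName_spec : Claim_equal_getDirectorSexFromName := by
  intro name _
  unfold Spec_getDirectorSexFromName getDirectorSexFromName getDirectorSexFromName_alt
  rw [scan_eq]
  by_cases hsp : ' ' ∈ name.toList
  · obtain ⟨t, ht⟩ := split_at_space name.toList hsp
    set tok := name.toList.takeWhile (fun c => c != ' ') with htokdef
    have htok : ' ' ∉ tok := by
      intro hmem
      have := List.mem_takeWhile_imp hmem
      simp at this
    rw [if_pos hsp, List.nil_append, classify_eq tok htok]
    have hanyM : (mensNames.any (fun maleName => PySem.Str.startswith name (maleName ++ " ")) = true)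
        ↔ ∃ w ∈ mensNames, w.toList = tok := by
      rw [List.any_eq_true]
      constructor
      · rintro ⟨m, hmem, hsw⟩
        exact ⟨m, hmem, (startswith_iff_token name m (mens_no_space m hmem) t ht).mp hsw⟩
      · rintro ⟨m, hmem, heq⟩
        exact ⟨m, hmem, (startswith_iff_token name m (mens_no_space m hmem) t ht).mpr heq⟩
    have hanyF : (womensNames.any (fun femaleName => PySem.Str.startswith name (femaleName ++ " ")) = true)
        ↔ ∃ w ∈ womensNames, w.toList = tok := by
      rw [List.any_eq_true]
      constructor
      · rintro ⟨m, hmem, hsw⟩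
        exact ⟨m, hmem, (startswith_iff_token name m (womens_no_space m hmem) t ht).mp hsw⟩
      · rintro ⟨m, hmem, heq⟩
        exact ⟨m, hmem, (startswith_iff_token name m (womens_no_space m hmem) t ht).mpr heq⟩
    by_cases h1 : ∃ w ∈ mensNames, w.toList = tok
    · simp only [hanyM.mpr h1]
      simp [h1]
    · have hM : mensNames.any (fun maleName => PySem.Str.startswith name (maleName ++ " ")) = false := by
        rw [Bool.eq_false_iff, ne_eq, hanyM]; exact h1
      by_cases h2 : ∃ w ∈ womensNames, w.toList = tok
      · simp only [hM, hanyF.mpr h2]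
        simp [h1, h2]
      · have hF : womensNames.any (fun femaleName => PySem.Str.startswith name (femaleName ++ " ")) = false := by
          rw [Bool.eq_false_iff, ne_eq, hanyF]; exact h2
        simp only [hM, hF]
        simp [h1, h2]
  · rw [if_neg hsp]
    have hM : mensNames.any (fun maleName => PySem.Str.startswith name (maleName ++ " ")) = false := by
      rw [List.any_eq_false]
      intro m _
      have := startswith_false_of_no_space name m hsp
      simpa using this
    have hF : womensNames.any (fun femaleName => PySem.Str.startswith name (femaleName ++ " ")) = false := by
      rw [List.any_eq_false]
      intro m _
      have := startswith_false_of_no_space name m hsp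
      simpa using this
    simp only [hM, hF]
    simp
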